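-- pv_equiv track=rewrite | github.com/jaewoogwak/sit-v2 | boundary_detection/inference_boundary.py | _coarse_peaks_to_frame_peaks
-- ===== SOURCE A (Python) =====
-- def _unique_sorted_ints(values):
--     out = []
--     seen = set()
--     for v in values:
--         try:
--             iv = int(v)
--         except Exception:
--             continue
--         if iv in seen:
--             continue
--         seen.add(iv)
--         out.append(iv)
--     out.sort()
--     return out
--
-- def _coarse_peaks_to_frame_peaks(peaks_segments, segment_edges):
--     frame_peaks = []
--     for s in _unique_sorted_ints(peaks_segments):
--         edge_idx = s + 1
--         if edge_idx <= 0 or edge_idx >= len(segment_edges):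
--             continue
--         edge = int(segment_edges[edge_idx])
--         frame_peak = edge - 1
--         if frame_peak >= 0:
--             frame_peaks.append(frame_peak)
--     return _unique_sorted_ints(frame_peaks)
-- ===== SOURCE B (Python) =====
-- def _coarse_peaks_to_frame_peaks(peaks_segments, segment_edges):
--     # Single pass: collect frame peaks in a set, sort once at the end.
--     result = set()
--     n = len(segment_edges)
--     for s in peaks_segments:
--         try:
--             s = int(s)
--         except Exception:
--             continue
--         edge_idx = s + 1
--         if edge_idx <= 0 or edge_idx >= n:
--             continue
--         frame_peak = int(segment_edges[edge_idx]) - 1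
--         if frame_peak >= 0:
--             result.add(frame_peak)
--     return sorted(result)
-- ===== Notes on version B (the rewrite author's own statement) =====
-- stated objective: simpler
-- what changed: Fuses A's three passes (dedupe input via list+seen, map loop, dedupe output via a second list+seen pass and two sorts) into one traversal that accumulates frame peaks directly in a set followed by a single sorted() call; dropping both _unique_sorted_ints calls is sound because the final sorted-dedup depends only on the set of mapped values.
import Mathlib
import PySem

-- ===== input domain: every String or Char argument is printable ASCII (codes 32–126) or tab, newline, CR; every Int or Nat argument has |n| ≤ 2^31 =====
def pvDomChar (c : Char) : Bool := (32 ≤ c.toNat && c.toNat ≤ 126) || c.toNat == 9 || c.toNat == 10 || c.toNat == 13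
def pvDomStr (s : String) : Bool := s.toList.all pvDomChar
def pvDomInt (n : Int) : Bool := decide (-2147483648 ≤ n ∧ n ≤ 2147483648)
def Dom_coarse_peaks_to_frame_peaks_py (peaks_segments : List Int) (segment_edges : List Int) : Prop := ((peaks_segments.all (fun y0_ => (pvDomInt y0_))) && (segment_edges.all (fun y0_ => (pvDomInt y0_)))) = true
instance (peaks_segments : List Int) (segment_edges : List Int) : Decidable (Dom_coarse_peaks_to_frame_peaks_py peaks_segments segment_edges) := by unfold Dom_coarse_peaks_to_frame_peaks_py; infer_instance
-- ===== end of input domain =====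

-- B fuses A's three passes (dedupe input, map, dedupe output with two sorts) into one
-- traversal accumulating a set of frame peaks plus a single final sort (objective: simpler).

-- ===== PORT A =====
-- loop body of _unique_sorted_ints: iv = int(v) is the identity on an Int input and never raises
def pvUniqStep (st : List Int × PySem.Set Int) (v : Int) : List Int × PySem.Set Int :=
  if st.2.contains v then st else (st.1 ++ [v], st.2.add v)

def pvUniqueSortedInts (values : List Int) : List Int :=
  PySem.List.sorted (values.foldl pvUniqStep ([], PySem.Set.empty)).1 (fun x => x)

-- loop body of A's for-loop: edge_idx = s + 1; the guard guarantees 0 < edge_idx < len,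
-- so the pyGetD default is never used; edge = int(segment_edges[edge_idx]) is the Int itself,
-- frame_peak = edge - 1
def pvAStep (segment_edges : List Int) (acc : List Int) (s : Int) : List Int :=
  if s + 1 ≤ 0 ∨ s + 1 ≥ (segment_edges.length : Int) then acc
  else if PySem.List.pyGetD segment_edges (s + 1) 0 - 1 ≥ 0
    then acc ++ [PySem.List.pyGetD segment_edges (s + 1) 0 - 1]
    else acc

def coarse_peaks_to_frame_peaks_py (peaks_segments : List Int) (segment_edges : List Int) : List Int :=
  pvUniqueSortedInts ((pvUniqueSortedInts peaks_segments).foldl (pvAStep segment_edges) [])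

-- ===== PORT B =====
-- loop body of B's single pass: edge_idx = s + 1; same guard; frame_peak = segment_edges[edge_idx] - 1
-- added to the result set when nonnegative
def pvBStep (segment_edges : List Int) (result : PySem.Set Int) (s : Int) : PySem.Set Int :=
  if s + 1 ≤ 0 ∨ s + 1 ≥ (segment_edges.length : Int) then result
  else if PySem.List.pyGetD segment_edges (s + 1) 0 - 1 ≥ 0
    then result.add (PySem.List.pyGetD segment_edges (s + 1) 0 - 1)
    else result

def coarse_peaks_to_frame_peaks_py_alt (peaks_segments : List Int) (segment_edges : List Int) : List Int :=
  PySem.List.sorted (peaks_segments.foldl (pvBStep segment_edges) PySem.Set.empty) (fun x => x)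

-- ===== PRECONDITION & SPEC =====
def Spec_coarse_peaks_to_frame_peaks_py (peaks_segments : List Int) (segment_edges : List Int) (out : List Int) : Prop := out = coarse_peaks_to_frame_peaks_py_alt peaks_segments segment_edges
instance (peaks_segments : List Int) (segment_edges : List Int) (out : List Int) : Decidable (Spec_coarse_peaks_to_frame_peaks_py peaks_segments segment_edges out) := by unfold Spec_coarse_peaks_to_frame_peaks_py; infer_instance

-- ===== CLAIM (what is proved, stated in full; the proofs are below) =====
def Claim_equal_coarse_peaks_to_frame_peaks_py : Prop := ∀ (peaks_segments : List Int) (segment_edges : List Int), Dom_coarse_peaks_to_frame_peaks_py peaks_segments segment_edges → Spec_coarse_peaks_to_frame_peaks_py peaks_segments segment_edges (coarse_peaks_to_frame_peaks_py peaks_segments segment_edges)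

-- ===== LEMMAS AND PROOFS =====

-- the per-peak partial map both programs realize
def pvF (segment_edges : List Int) (s : Int) : Option Int :=
  if s + 1 ≤ 0 ∨ s + 1 ≥ (segment_edges.length : Int) then none
  else if PySem.List.pyGetD segment_edges (s + 1) 0 - 1 ≥ 0
    then some (PySem.List.pyGetD segment_edges (s + 1) 0 - 1)
    else none

lemma pvUniqFold_inv (values : List Int) (st : List Int × PySem.Set Int)
    (hnd : st.1.Nodup) (hs : ∀ x, x ∈ st.2 ↔ x ∈ st.1) :
    (values.foldl pvUniqStep st).1.Nodup ∧
    (∀ x, x ∈ (values.foldl pvUniqStep st).1 ↔ x ∈ st.1 ∨ x ∈ values) := by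
  induction values generalizing st with
  | nil => simpa using hnd
  | cons v vs ih =>
    rw [List.foldl_cons]
    by_cases h : st.2.contains v = true
    · have hv : v ∈ st.1 := (hs v).mp ((PySem.Set.contains_iff st.2 v).mp h)
      have hstep : pvUniqStep st v = st := by unfold pvUniqStep; exact if_pos h
      rw [hstep]
      obtain ⟨h1, h2⟩ := ih st hnd hs
      refine ⟨h1, fun x => ?_⟩
      rw [h2 x]
      constructor
      · rintro (hx | hx)
        · exact Or.inl hx
        · exact Or.inr (List.mem_cons_of_mem v hx)
      · rintro (hx | hx)
        · exact Or.inl hx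
        · rcases List.mem_cons.mp hx with rfl | hx
          · exact Or.inl hv
          · exact Or.inr hx
    · have hv : v ∉ st.1 := fun hvo => h ((PySem.Set.contains_iff st.2 v).mpr ((hs v).mpr hvo))
      have hstep : pvUniqStep st v = (st.1 ++ [v], st.2.add v) := by
        unfold pvUniqStep; exact if_neg h
      rw [hstep]
      have hnd' : (st.1 ++ [v]).Nodup := by { simp [List.nodup_append, hnd]; exact fun a ha hav => hv (hav ▸ ha) }
      have hs' : ∀ x, x ∈ st.2.add v ↔ x ∈ st.1 ++ [v] := by
        intro x
        rw [PySem.Set.mem_add st.2 v x, hs x]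
        simp
      obtain ⟨h1, h2⟩ := ih (st.1 ++ [v], st.2.add v) hnd' hs'
      refine ⟨h1, fun x => ?_⟩
      rw [h2 x]
      simp
      tauto

lemma pvUniqueSortedInts_spec (values : List Int) :
    (pvUniqueSortedInts values).Nodup ∧
    (∀ x, x ∈ pvUniqueSortedInts values ↔ x ∈ values) := by
  have hperm := PySem.List.sorted_perm
    (values.foldl pvUniqStep ([], PySem.Set.empty)).1 (fun x : Int => x) false
  have hinv := pvUniqFold_inv values ([], PySem.Set.empty) List.nodup_nil
    (by intro x; simp [PySem.Set.empty])
  unfold pvUniqueSortedInts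
  refine ⟨hperm.symm.nodup hinv.1, fun x => ?_⟩
  rw [hperm.mem_iff, hinv.2 x]
  simp

lemma pvAStep_eq (segment_edges : List Int) (acc : List Int) (s : Int) :
    pvAStep segment_edges acc s = acc ++ (pvF segment_edges s).toList := by
  unfold pvAStep pvF
  by_cases h : s + 1 ≤ 0 ∨ s + 1 ≥ (segment_edges.length : Int)
  · rw [if_pos h, if_pos h, Option.toList_none, List.append_nil]
  · rw [if_neg h, if_neg h]
    by_cases h2 : PySem.List.pyGetD segment_edges (s + 1) 0 - 1 ≥ 0
    · rw [if_pos h2, if_pos h2, Option.toList_some]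
    · rw [if_neg h2, if_neg h2, Option.toList_none, List.append_nil]

lemma pvALoop_eq (segment_edges xs : List Int) (acc : List Int) :
    xs.foldl (pvAStep segment_edges) acc = acc ++ xs.filterMap (pvF segment_edges) := by
  induction xs generalizing acc with
  | nil => simp
  | cons s xs ih =>
    rw [List.foldl_cons, ih, pvAStep_eq]
    cases h : pvF segment_edges s <;> simp [h]

lemma pvBStep_eq (segment_edges : List Int) (acc : PySem.Set Int) (s : Int) :
    (pvBStep segment_edges acc s = acc ∧ pvF segment_edges s = none) ∨
    (∃ y, pvBStep segment_edges acc s = acc.add y ∧ pvF segment_edges s = some y) := by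
  unfold pvBStep pvF
  by_cases h : s + 1 ≤ 0 ∨ s + 1 ≥ (segment_edges.length : Int)
  · exact Or.inl ⟨if_pos h, if_pos h⟩
  · rw [if_neg h, if_neg h]
    by_cases h2 : PySem.List.pyGetD segment_edges (s + 1) 0 - 1 ≥ 0
    · exact Or.inr ⟨_, if_pos h2, if_pos h2⟩
    · exact Or.inl ⟨if_neg h2, if_neg h2⟩

lemma pvBFold_inv (segment_edges xs : List Int) (acc : PySem.Set Int)
    (hnd : List.Nodup acc) :
    List.Nodup (xs.foldl (pvBStep segment_edges) acc) ∧
    (∀ x, x ∈ xs.foldl (pvBStep segment_edges) acc ↔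
      x ∈ acc ∨ ∃ s ∈ xs, pvF segment_edges s = some x) := by
  induction xs generalizing acc with
  | nil => simpa using hnd
  | cons s xs ih =>
    rw [List.foldl_cons]
    rcases pvBStep_eq segment_edges acc s with ⟨heq, hf⟩ | ⟨y, heq, hf⟩
    · rw [heq]
      obtain ⟨h1, h2⟩ := ih acc hnd
      refine ⟨h1, fun x => ?_⟩
      rw [h2 x]
      simp [hf]
    · rw [heq]
      obtain ⟨h1, h2⟩ := ih (acc.add y) (PySem.Set.nodup_add acc y hnd)
      refine ⟨h1, fun x => ?_⟩
      rw [h2 x]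
      simp only [PySem.Set.mem_add, List.mem_cons]
      constructor
      · rintro ((hx | rfl) | hx)
        · exact Or.inl hx
        · exact Or.inr ⟨s, Or.inl rfl, hf⟩
        · obtain ⟨t, ht, hft⟩ := hx
          exact Or.inr ⟨t, Or.inr ht, hft⟩
      · rintro (hx | ⟨t, (rfl | ht), hft⟩)
        · exact Or.inl (Or.inl hx)
        · rw [hf] at hft
          exact Or.inl (Or.inr (Option.some_inj.mp hft).symm)
        · exact Or.inr ⟨t, ht, hft⟩

lemma pvPairwise_lt_of_sorted (xs : List Int) (hnd : xs.Nodup) :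
    (PySem.List.sorted xs (fun x : Int => x)).Pairwise (· < ·) := by
  have hle := PySem.List.sorted_pairwise xs (fun x : Int => x)
  have hnd' : (PySem.List.sorted xs (fun x : Int => x)).Nodup :=
    (PySem.List.sorted_perm xs (fun x : Int => x) false).symm.nodup hnd
  exact (hle.and hnd').imp (fun h => lt_of_le_of_ne h.1 h.2)

-- ===== VERDICT (by name: the statement is the Claim_ definition above) =====
theorem coarse_peaks_to_frame_peaks_py_spec : Claim_equal_coarse_peaks_to_frame_peaks_py := by
  intro peaks segs _
  unfold Spec_coarse_peaks_to_frame_peaks_py coarse_peaks_to_frame_peaks_py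
    coarse_peaks_to_frame_peaks_py_alt
  set U1 := pvUniqueSortedInts peaks with hU1
  set L := U1.foldl (pvAStep segs) [] with hLdef
  set S := peaks.foldl (pvBStep segs) PySem.Set.empty with hSdef
  have hB := pvBFold_inv segs peaks PySem.Set.empty List.nodup_nil
  have hU1spec := pvUniqueSortedInts_spec peaks
  have hLmem : ∀ x, x ∈ L ↔ ∃ s ∈ peaks, pvF segs s = some x := by
    intro x
    rw [hLdef, pvALoop_eq]
    simp only [List.nil_append, List.mem_filterMap]
    constructor
    · rintro ⟨s, hs, hf⟩
      exact ⟨s, (hU1spec.2 s).mp hs, hf⟩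
    · rintro ⟨s, hs, hf⟩
      exact ⟨s, (hU1spec.2 s).mpr hs, hf⟩
  have hU2spec := pvUniqueSortedInts_spec L
  have hSmem : ∀ x, x ∈ S ↔ x ∈ pvUniqueSortedInts L := by
    intro x
    rw [hU2spec.2 x, hLmem x, hB.2 x]
    simp [PySem.Set.empty]
  have hperm : (PySem.List.sorted S (fun x : Int => x)).Perm (pvUniqueSortedInts L) := by
    refine (List.perm_ext_iff_of_nodup
      ((PySem.List.sorted_perm S (fun x : Int => x) false).symm.nodup hB.1) hU2spec.1).mpr ?_
    intro a
    rw [(PySem.List.sorted_perm S (fun x : Int => x) false).mem_iff, hSmem a]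
  have hpw := pvPairwise_lt_of_sorted S hB.1
  exact PySem.List.sorted_eq_of_perm_of_pairwise_lt
    ((L.foldl pvUniqStep ([], PySem.Set.empty)).1)
    (PySem.List.sorted S (fun x : Int => x)) (fun x : Int => x)
    (hperm.trans (PySem.List.sorted_perm _ _ false)) hpw
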